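-- pv_equiv track=rewrite | github.com/blacksmithalex/ege_computer_science | Kpolyakov/5/5991.py | f
-- ===== SOURCE A (Python) =====
-- def cmd1(a):
--     part = a[-4:]
--     part = ''.join([str((int(x) + 1) % 2)  for x in part])
--     return a[:-4] + part
--
-- def cmd2(a):
--     part = a[-5:-1]
--     part = ''.join([str((int(x) + 1) % 2) for x in part])
--     return a[:-5] + part + a[-1]
--
-- def f(n):
--     n = bin(n)[2:]
--     s = sum([int(x) for x in n])
--     if s % 2 == 0:
--         n = cmd1(n)
--     else:
--         n = cmd2(n)
--     return int(n, 2)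
-- ===== SOURCE B (Python) =====
-- def f(n):
--     bits = bin(n)[2:]
--     L = len(bits)
--     if bits.count('1') % 2 == 0:
--         return n ^ ((1 << min(L, 4)) - 1)
--     else:
--         return n ^ ((1 << min(L, 5)) - 2)
-- ===== Notes on version B (the rewrite author's own statement) =====
-- stated objective: simpler
-- what changed: Replaces the string slicing, per-character flip/reparse of cmd1/cmd2 with a single closed-form XOR mask ((1<<min(L,4))-1 on the even-parity branch, (1<<min(L,5))-2 on the odd one) applied directly to n.
import Mathlib
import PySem

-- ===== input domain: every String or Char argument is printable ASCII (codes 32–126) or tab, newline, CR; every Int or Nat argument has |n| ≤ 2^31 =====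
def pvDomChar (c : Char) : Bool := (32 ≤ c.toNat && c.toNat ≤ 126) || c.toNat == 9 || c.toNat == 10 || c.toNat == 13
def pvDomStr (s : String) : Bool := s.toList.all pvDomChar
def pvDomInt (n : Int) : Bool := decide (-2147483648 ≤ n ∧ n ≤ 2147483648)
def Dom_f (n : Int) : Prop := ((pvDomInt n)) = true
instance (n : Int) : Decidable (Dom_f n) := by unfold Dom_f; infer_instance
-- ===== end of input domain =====

-- B replaces the string slicing / per-character flip / reparse of cmd1 and cmd2 by one
-- closed-form XOR mask applied directly to n (objective: simpler).

-- ===== PORT A =====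
-- Python strings are handled as their code-point lists (List Char), per the PySem Chars API.

-- hand port of int(s, 2), exact on the inputs it receives here: cmd1/cmd2 always hand it a
-- nonempty string of '0'/'1' characters (no sign/space/underscore/prefix ever occurs), on which
-- CPython's int(s, 2) is exactly this left-to-right digit fold; none = ValueError.
-- (PySem.Int.ofCharsBase? computes the same values but its recursion is private, so it cannot
-- be reasoned about in the proofs below.)
def pyIntBase2? (cs : List Char) : Option Int :=
  if cs = [] then none
  else
    (cs.foldl (fun acc c => acc.bind (fun a =>
        if c = '0' then some (2 * a) else if c = '1' then some (2 * a + 1) else none))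
      (some (0 : Nat))).map (fun v => (v : Int))

-- cmd1(a): part = a[-4:]; part = ''.join([str((int(x)+1)%2) for x in part]); return a[:-4] + part
def cmd1 (a : List Char) : List Char :=
  let part := PySem.List.slice a (some (-4)) none
  let part := (part.map (fun x =>
      PySem.Int.toChars (PySem.Int.mod ((PySem.Int.ofChars? [x]).getD 0 + 1) 2))).flatten
  PySem.List.slice a none (some (-4)) ++ part

-- cmd2(a): part = a[-5:-1]; part = ''.join([str((int(x)+1)%2) for x in part]); return a[:-5] + part + a[-1]
def cmd2 (a : List Char) : List Char :=
  let part := PySem.List.slice a (some (-5)) (some (-1))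
  let part := (part.map (fun x =>
      PySem.Int.toChars (PySem.Int.mod ((PySem.Int.ofChars? [x]).getD 0 + 1) 2))).flatten
  PySem.List.slice a none (some (-5)) ++ part ++ [(PySem.List.pyGet? a (-1)).getD ' ']

-- f(n): n = bin(n)[2:]; s = sum([int(x) for x in n]); n = cmd1(n) if s%2==0 else cmd2(n); return int(n,2)
-- int(x) / int(n,2) raise ValueError for n < 0 (the 'b' of '-0b…' survives the [2:] slice);
-- those inputs are excluded by Pre_f, so the `.getD` defaults are never reached inside Pre_f.
def f (n : Int) : Int :=
  let s := PySem.Chars.slice (PySem.Int.pyBin n).toList (some 2) none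
  let sum : Int := (s.map (fun x => (PySem.Int.ofChars? [x]).getD 0)).sum
  let s := if PySem.Int.mod sum 2 = 0 then cmd1 s else cmd2 s
  (pyIntBase2? s).getD 0

-- ===== PORT B =====
-- bits = bin(n)[2:]; L = len(bits); return n ^ ((1<<min(L,4))-1)  resp.  n ^ ((1<<min(L,5))-2)
def f_alt (n : Int) : Int :=
  let bits := PySem.Chars.slice (PySem.Int.pyBin n).toList (some 2) none
  let L : Int := bits.length
  if (PySem.List.count bits '1') % 2 = 0 then
    PySem.Int.bxor n (2 ^ (min L 4).toNat - 1)
  else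
    PySem.Int.bxor n (2 ^ (min L 5).toNat - 2)

-- ===== PRECONDITION & SPEC =====
-- Python A raises ValueError for every n < 0 (bin(n)[2:] then starts with 'b'); Pre_f keeps the nonnegative inputs.
def Pre_f (n : Int) : Prop := 0 ≤ n
instance (n : Int) : Decidable (Pre_f n) := by unfold Pre_f; infer_instance
def pvWitness_f : Int := 6

def Spec_f (n : Int) (out : Int) : Prop := out = f_alt n
instance (n : Int) (out : Int) : Decidable (Spec_f n out) := by unfold Spec_f; infer_instance

-- ===== CLAIM (what is proved, stated in full; the proofs are below) =====
def Claim_equal_f : Prop := ∀ (n : Int), Dom_f n → Pre_f n → Spec_f n (f n)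

-- ===== LEMMAS AND PROOFS =====

-- the number a '0'/'1' string denotes in base 2
def bitD (c : Char) : Nat := if c = '1' then 1 else 0

def bitsVal (cs : List Char) : Nat := cs.foldl (fun a c => 2 * a + bitD c) 0

def IsBits (cs : List Char) : Prop := ∀ c ∈ cs, c = '0' ∨ c = '1'

def flipChar (c : Char) : Char := if c = '1' then '0' else '1'

lemma foldl_acc (cs : List Char) : ∀ a : Nat,
    cs.foldl (fun a c => 2 * a + bitD c) a = a * 2 ^ cs.length + bitsVal cs := by
  induction cs with
  | nil => simp [bitsVal]
  | cons c cs ih =>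
    intro a
    simp only [List.foldl_cons, List.length_cons, bitsVal]
    rw [ih (2 * a + bitD c), ih (2 * 0 + bitD c)]
    ring

lemma bitsVal_cons (c : Char) (cs : List Char) :
    bitsVal (c :: cs) = bitD c * 2 ^ cs.length + bitsVal cs := by
  simp only [bitsVal, List.foldl_cons]
  rw [foldl_acc]; simp [bitsVal]

lemma bitsVal_append (u v : List Char) :
    bitsVal (u ++ v) = bitsVal u * 2 ^ v.length + bitsVal v := by
  simp only [bitsVal, List.foldl_append]
  rw [foldl_acc]; rfl

lemma bitD_lt (c : Char) : bitD c < 2 := by unfold bitD; split <;> omega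

lemma bitsVal_lt (cs : List Char) : bitsVal cs < 2 ^ cs.length := by
  induction cs with
  | nil => simp [bitsVal]
  | cons c cs ih =>
    rw [bitsVal_cons]
    have := bitD_lt c
    simp only [List.length_cons, pow_succ]
    nlinarith [ih]

lemma bitsVal_flip (cs : List Char) (h : IsBits cs) :
    bitsVal (cs.map flipChar) = 2 ^ cs.length - 1 - bitsVal cs := by
  induction cs with
  | nil => simp [bitsVal]
  | cons c cs ih =>
    have hc := h c (by simp)
    have hb : IsBits cs := fun x hx => h x (by simp [hx])
    have hlt := bitsVal_lt cs
    have h1 : (1:Nat) ≤ 2 ^ cs.length := Nat.one_le_two_pow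
    simp only [List.map_cons, bitsVal_cons, List.length_map, List.length_cons, ih hb]
    have h2 : (2:Nat) ^ (cs.length + 1) = 2 ^ cs.length + 2 ^ cs.length := by ring
    rcases hc with rfl | rfl <;> simp [flipChar, bitD] <;> omega

-- XOR arithmetic
lemma xor_bit_step (u v b c : Nat) (hb : b < 2) (hc : c < 2) :
    (2 * u + b) ^^^ (2 * v + c) = 2 * (u ^^^ v) + (b ^^^ c) := by
  have h1 : ∀ (w d : Nat), d < 2 → 2 * w + d = Nat.bit (d = 1) w := by
    intro w d hd; interval_cases d <;> simp [Nat.bit]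
  rw [h1 u b hb, h1 v c hc, Nat.xor_bit]
  interval_cases b <;> interval_cases c <;> simp [Nat.bit]

lemma xor_mask (k : Nat) : ∀ a x : Nat, x < 2 ^ k →
    (a * 2 ^ k + x) ^^^ (2 ^ k - 1) = a * 2 ^ k + (2 ^ k - 1 - x) := by
  induction k with
  | zero => intro a x hx; simp at hx; simp [hx]
  | succ k ih =>
    intro a x hx
    have hx2 : x / 2 < 2 ^ k := by
      have : (2:Nat) ^ (k+1) = 2 ^ k * 2 := by ring
      omega
    have ha : a * 2 ^ (k+1) = 2 * (a * 2 ^ k) := by ring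
    have e1 : a * 2 ^ (k+1) + x = 2 * (a * 2 ^ k + x / 2) + x % 2 := by omega
    have e2 : 2 ^ (k+1) - 1 = 2 * (2 ^ k - 1) + 1 := by
      have h1 : (1:Nat) ≤ 2 ^ k := Nat.one_le_two_pow
      have : (2:Nat) ^ (k+1) = 2 ^ k * 2 := by ring
      omega
    have hb2 : x % 2 < 2 := Nat.mod_lt _ (by norm_num)
    rw [e1, e2, xor_bit_step _ _ _ _ hb2 (by norm_num), ih a (x / 2) hx2]
    have h1 : (1:Nat) ≤ 2 ^ k := Nat.one_le_two_pow
    have : x % 2 ^^^ 1 = 1 - x % 2 := by interval_cases h : (x % 2) <;> simp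
    omega

lemma xor_mask2 (k a x b : Nat) (hx : x < 2 ^ k) (hb : b < 2) :
    (a * (2 ^ k * 2) + (x * 2 + b)) ^^^ (2 ^ k * 2 - 2)
      = a * (2 ^ k * 2) + ((2 ^ k - 1 - x) * 2 + b) := by
  have h1 : (1:Nat) ≤ 2 ^ k := Nat.one_le_two_pow
  have e1 : a * (2 ^ k * 2) + (x * 2 + b) = 2 * (a * 2 ^ k + x) + b := by ring
  have e2 : 2 ^ k * 2 - 2 = 2 * (2 ^ k - 1) + 0 := by omega
  rw [e1, e2, xor_bit_step _ _ _ _ hb (by norm_num), xor_mask k a x hx]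
  have : b ^^^ 0 = b := by simp
  omega

-- Nat.toDigits 2 facts
lemma toDigits_bits (m : Nat) : IsBits (Nat.toDigits 2 m) := by
  induction m using Nat.strong_induction_on with
  | _ m ih =>
    rw [Nat.toDigits_eq_if (by norm_num)]
    split
    · intro c hc
      simp at hc
      subst hc
      interval_cases m <;> simp [Nat.digitChar]
    · rename_i hm
      intro c hc
      rcases List.mem_append.1 hc with h | h
      · exact ih (m / 2) (by omega) c h
      · simp at h
        subst h
        have : m % 2 < 2 := Nat.mod_lt _ (by norm_num)
        interval_cases (m % 2) <;> simp [Nat.digitChar] at *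

lemma bitsVal_toDigits (m : Nat) : bitsVal (Nat.toDigits 2 m) = m := by
  induction m using Nat.strong_induction_on with
  | _ m ih =>
    rw [Nat.toDigits_eq_if (by norm_num)]
    split
    · rename_i hm
      interval_cases m <;> simp [bitsVal, bitD, Nat.digitChar]
    · rename_i hm
      rw [bitsVal_append, ih (m / 2) (by omega)]
      have h2 : m % 2 < 2 := Nat.mod_lt _ (by norm_num)
      have : bitsVal [(m % 2).digitChar] = m % 2 := by
        interval_cases (m % 2) <;> simp [bitsVal, bitD, Nat.digitChar]
      simp [this]
      omega

-- the hand-ported int(s,2) on a bit string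
lemma foldl_opt_bits (cs : List Char) (h : IsBits cs) : ∀ a : Nat,
    cs.foldl (fun acc c => acc.bind (fun a =>
        if c = '0' then some (2 * a) else if c = '1' then some (2 * a + 1) else none))
      (some a) = some (cs.foldl (fun a c => 2 * a + bitD c) a) := by
  induction cs with
  | nil => intro a; rfl
  | cons c cs ih =>
    intro a
    have hb : IsBits cs := fun x hx => h x (by simp [hx])
    rcases h c (by simp) with rfl | rfl
    · rw [List.foldl_cons, List.foldl_cons, Option.bind_some, if_pos rfl, ih hb]
      simp [bitD]
    · rw [List.foldl_cons, List.foldl_cons, Option.bind_some, if_neg (by decide), if_pos rfl, ih hb]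
      simp [bitD]

lemma pyIntBase2?_bits (cs : List Char) (h : IsBits cs) (hne : cs ≠ []) :
    pyIntBase2? cs = some ((bitsVal cs : Nat) : Int) := by
  unfold pyIntBase2?
  rw [if_neg hne, foldl_opt_bits cs h 0]
  rfl

-- the flip comprehension of cmd1/cmd2
lemma flip_join (cs : List Char) (h : IsBits cs) :
    (cs.map (fun x =>
      PySem.Int.toChars (PySem.Int.mod ((PySem.Int.ofChars? [x]).getD 0 + 1) 2))).flatten
    = cs.map flipChar := by
  induction cs with
  | nil => rfl
  | cons c cs ih =>
    have hb : IsBits cs := fun x hx => h x (by simp [hx])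
    have e0 : PySem.Int.toChars (PySem.Int.mod ((PySem.Int.ofChars? ['0']).getD 0 + 1) 2) = ['1'] := by decide
    have e1 : PySem.Int.toChars (PySem.Int.mod ((PySem.Int.ofChars? ['1']).getD 0 + 1) 2) = ['0'] := by decide
    rcases h c (by simp) with rfl | rfl
    · simp only [List.map_cons, List.flatten_cons, ih hb, e0]; simp [flipChar]
    · simp only [List.map_cons, List.flatten_cons, ih hb, e1]; simp [flipChar]

-- parity of the digit sum = count of '1'
lemma sum_eq_count (cs : List Char) (h : IsBits cs) :
    (cs.map (fun x => ((PySem.Int.ofChars? [x]).getD 0 : Int))).sum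
      = ((PySem.List.count cs '1' : Nat) : Int) := by
  induction cs with
  | nil => rfl
  | cons c cs ih =>
    have hb : IsBits cs := fun x hx => h x (by simp [hx])
    have c0 : ((PySem.Int.ofChars? ['0']).getD 0 : Int) = 0 := by decide
    have c1 : ((PySem.Int.ofChars? ['1']).getD 0 : Int) = 1 := by decide
    rcases h c (by simp) with rfl | rfl <;>
      simp only [List.map_cons, List.sum_cons, ih hb, c0, c1, PySem.List.count, List.count_cons] <;>
      simp <;> omega

lemma toNat_min_cast (L k : Nat) : (min ((L : Int)) ((k : Int))).toNat = min L k := by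
  rcases Nat.le_total L k with h | h
  · rw [min_eq_left (by exact_mod_cast h : ((L:Int)) ≤ (k:Int)), Int.toNat_natCast, Nat.min_eq_left h]
  · rw [min_eq_right (by exact_mod_cast h : ((k:Int)) ≤ (L:Int)), Int.toNat_natCast, Nat.min_eq_right h]

lemma bits_take (cs : List Char) (k : Nat) (h : IsBits cs) : IsBits (cs.take k) :=
  fun c hc => h c (List.mem_of_mem_take hc)

lemma bits_drop (cs : List Char) (k : Nat) (h : IsBits cs) : IsBits (cs.drop k) :=
  fun c hc => h c (List.mem_of_mem_drop hc)

-- the two branch computations, stated over the bit string a of n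
lemma bits_map_flip (cs : List Char) : IsBits (cs.map flipChar) := by
  intro c hc
  rcases List.mem_map.1 hc with ⟨x, _, rfl⟩
  unfold flipChar; split <;> simp

lemma cmd1_val (a : List Char) (h : IsBits a) (hne : a ≠ []) :
    pyIntBase2? (cmd1 a) = some ((bitsVal a ^^^ (2 ^ (min a.length 4) - 1) : Nat) : Int) := by
  have hL1 : 0 < a.length := List.length_pos_of_ne_nil hne
  unfold cmd1
  dsimp only
  rw [PySem.List.slice_from_neg_ofNat a 4 (by norm_num),
      PySem.List.slice_to_neg_ofNat a 4 (by norm_num),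
      flip_join _ (bits_drop a _ h)]
  have hball : IsBits (a.take (a.length - 4) ++ (a.drop (a.length - 4)).map flipChar) := by
    intro c hc
    rcases List.mem_append.1 hc with hc | hc
    · exact bits_take a _ h c hc
    · exact bits_map_flip _ c hc
  have hnel : a.take (a.length - 4) ++ (a.drop (a.length - 4)).map flipChar ≠ [] := by
    intro he
    have hlen := congrArg List.length he
    simp only [List.length_append, List.length_take, List.length_map, List.length_drop,
      List.length_nil] at hlen
    omega
  rw [pyIntBase2?_bits _ hball hnel, bitsVal_append, bitsVal_flip _ (bits_drop a _ h)]
  simp only [List.length_map, List.length_drop]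
  rw [show a.length - (a.length - 4) = min a.length 4 from by omega]
  have hsplit : bitsVal a
      = bitsVal (a.take (a.length - 4)) * 2 ^ (min a.length 4)
        + bitsVal (a.drop (a.length - 4)) := by
    conv_lhs => rw [← List.take_append_drop (a.length - 4) a]
    rw [bitsVal_append]
    simp only [List.length_drop]
    rw [show a.length - (a.length - 4) = min a.length 4 from by omega]
  have hlt : bitsVal (a.drop (a.length - 4)) < 2 ^ (min a.length 4) := by
    have := bitsVal_lt (a.drop (a.length - 4))
    simpa [show a.length - (a.length - 4) = min a.length 4 from by omega] using this
  rw [hsplit, xor_mask _ _ _ hlt]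

lemma pyGet_last (p : List Char) (z : Char) :
    (PySem.List.pyGet? (p ++ [z]) (-1)).getD ' ' = z := by
  simp [PySem.List.pyGet?, PySem.List.pyIdx?]

lemma cmd2_val (a : List Char) (h : IsBits a) (hne : a ≠ []) :
    pyIntBase2? (cmd2 a) = some ((bitsVal a ^^^ (2 ^ (min a.length 5) - 2) : Nat) : Int) := by
  have hL1 : 0 < a.length := List.length_pos_of_ne_nil hne
  set w := a.drop (a.length - 5) with hwdef
  have hwlen : w.length = min a.length 5 := by rw [hwdef]; simp; omega
  have hwne : w ≠ [] := by
    intro he; rw [he] at hwlen; simp at hwlen; omega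
  rcases (List.eq_nil_or_concat w).resolve_left hwne with ⟨v, z, hvz'⟩
  have hvz : w = v ++ [z] := by simpa using hvz'
  have hvlen : v.length = min a.length 5 - 1 := by
    have := hwlen; rw [hvz] at this; simp at this; omega
  have hadec : a = a.take (a.length - 5) ++ (v ++ [z]) := by
    rw [← hvz, hwdef, List.take_append_drop]
  have hdrop : a.drop (a.length - 5) = v ++ [z] := by rw [← hwdef, hvz]
  -- the three pieces of cmd2
  unfold cmd2
  dsimp only
  have hmid : PySem.List.slice a (some (-5)) (some (-1)) = v := by
    simp only [PySem.List.slice, PySem.List.clampIdx_neg_one,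
      PySem.List.clampIdx_neg_ofNat a.length 5 (by norm_num)]
    rw [hdrop, show a.length - 1 - (a.length - 5) = v.length from by omega]
    simp
  have hlast : (PySem.List.pyGet? a (-1)).getD ' ' = z := by
    conv_lhs => rw [hadec]
    rw [show a.take (a.length - 5) ++ (v ++ [z]) = (a.take (a.length - 5) ++ v) ++ [z] from by simp]
    exact pyGet_last _ z
  have hvbits : IsBits v := by
    intro c hc
    exact h c (by rw [hadec]; simp [hc])
  have hzbit : z = '0' ∨ z = '1' := h z (by rw [hadec]; simp)
  rw [hmid, hlast, PySem.List.slice_to_neg_ofNat a 5 (by norm_num),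
      flip_join _ hvbits]
  have hball : IsBits (a.take (a.length - 5) ++ v.map flipChar ++ [z]) := by
    intro c hc
    rcases List.mem_append.1 hc with hc | hc
    · rcases List.mem_append.1 hc with hc | hc
      · exact bits_take a _ h c hc
      · exact bits_map_flip _ c hc
    · simp at hc; subst hc; exact hzbit
  have hnel : a.take (a.length - 5) ++ v.map flipChar ++ [z] ≠ [] := by simp
  rw [pyIntBase2?_bits _ hball hnel, bitsVal_append, bitsVal_append, bitsVal_flip _ hvbits]
  simp only [List.length_map, List.length_cons, List.length_nil]
  have hz1 : bitsVal [z] = bitD z := by simp [bitsVal, bitD]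
  have hsplit : bitsVal a
      = bitsVal (a.take (a.length - 5)) * (2 ^ v.length * 2)
        + (bitsVal v * 2 + bitD z) := by
    conv_lhs => rw [hadec]
    rw [bitsVal_append, bitsVal_append, hz1]
    simp only [List.length_append, List.length_cons, List.length_nil]
    ring_nf
  have hlt : bitsVal v < 2 ^ v.length := bitsVal_lt v
  have hmask : 2 ^ (min a.length 5) - 2 = 2 ^ v.length * 2 - 2 := by
    rw [show min a.length 5 = v.length + 1 from by omega, pow_succ]
  rw [hsplit, hmask, xor_mask2 _ _ _ _ hlt (bitD_lt z), hz1]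
  exact congrArg _ (congrArg _ (by ring))

-- ===== VERDICT (by name: the statement is the Claim_ definition above) =====
theorem f_spec : Claim_equal_f := by
  intro n _ hpre
  unfold Spec_f f f_alt
  have hpre' : (0:Int) ≤ n := hpre
  have hn : ¬ n < 0 := by omega
  set m := n.toNat with hm
  have hncast : (m : Int) = n := Int.toNat_of_nonneg hpre
  have hs : PySem.Chars.slice (PySem.Int.pyBin n).toList (some 2) none = Nat.toDigits 2 m := by
    rw [PySem.Int.toList_pyBin, PySem.Chars.slice_eq_listSlice]
    unfold PySem.Int.toBinChars0b
    rw [if_neg hn, PySem.List.slice_from _ (by norm_num : (0:Int) ≤ 2)]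
    rfl
  rw [hs]
  set a := Nat.toDigits 2 m with hadef
  have hbits : IsBits a := toDigits_bits m
  have hane : a ≠ [] := by
    have := @Nat.length_toDigits_pos 2 m
    intro he; rw [← hadef] at *; simp [he] at this
  have hval : bitsVal a = m := bitsVal_toDigits m
  have hL1 : 1 ≤ a.length := by
    rw [hadef]; have := @Nat.length_toDigits_pos 2 m; omega
  dsimp only
  -- the two branch conditions agree
  rw [sum_eq_count a hbits]
  have hmod : PySem.Int.mod ((PySem.List.count a '1' : Nat) : Int) 2
      = ((PySem.List.count a '1' % 2 : Nat) : Int) := by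
    exact_mod_cast PySem.Int.mod_natCast (PySem.List.count a '1') 2
  rw [hmod]
  have hcond : (((PySem.List.count a '1' % 2 : Nat) : Int) = 0) ↔ ((PySem.List.count a '1') % 2 = 0) := by
    omega
  by_cases hp : (PySem.List.count a '1') % 2 = 0
  · rw [if_pos (hcond.2 hp), if_pos hp, cmd1_val a hbits hane]
    have hmin : (min ((a.length : Int)) 4).toNat = min a.length 4 := by
      have := toNat_min_cast a.length 4; norm_num at this ⊢; exact this
    have hmask : ((2:Int) ^ (min a.length 4) - 1) = ((2 ^ (min a.length 4) - 1 : Nat) : Int) := by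
      have : (1:Nat) ≤ 2 ^ (min a.length 4) := Nat.one_le_two_pow
      push_cast [this]; ring
    rw [hmin, hmask, ← hncast, PySem.Int.bxor_natCast]
    simp [hval]
  · rw [if_neg (fun hc => hp (hcond.1 hc)), if_neg hp, cmd2_val a hbits hane]
    have hmin : (min ((a.length : Int)) 5).toNat = min a.length 5 := by
      have := toNat_min_cast a.length 5; norm_num at this ⊢; exact this
    have hmask : ((2:Int) ^ (min a.length 5) - 2) = ((2 ^ (min a.length 5) - 2 : Nat) : Int) := by
      have h1 : 1 ≤ min a.length 5 := by omega
      have : (2:Nat) ≤ 2 ^ (min a.length 5) := by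
        calc (2:Nat) = 2 ^ 1 := by norm_num
        _ ≤ 2 ^ (min a.length 5) := Nat.pow_le_pow_right (by norm_num) h1
      push_cast [this]; ring
    rw [hmin, hmask, ← hncast, PySem.Int.bxor_natCast]
    simp [hval]
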